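-- pv_equiv track=rewrite | github.com/Sebaestschjin/advent-of-code | year2017/day06/solver.py | allocate_b
-- ===== SOURCE A (Python) =====
-- def allocate_b(memory):
--     seen = []
--     tester = None
--     steps = 0
--
--     while True:
--         if tester is not None:
--             steps = steps + 1
--         cur_max = max(memory)
--         cur_index = memory.index(cur_max)
--         memory[cur_index] = 0
--         for i in range(1, cur_max + 1):
--             idx = (cur_index + i) % len(memory)
--             memory[idx] = memory[idx] + 1
--         current = list(memory)
--         if current in seen:
--             if tester is not None:
--                 return steps
--             tester = current
--             seen.clear()
--         seen.append(current)
-- ===== SOURCE B (Python) =====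
-- def allocate_b(memory):
--     # One pass with a first-seen dict (cycle length = step - first_seen[state]);
--     # each reallocation is done in closed form: divmod spreads the blocks arithmetically.
--     n = len(memory)
--     first_seen = {}
--     step = 0
--     state = memory
--     while True:
--         m = max(state)
--         c = state.index(m)
--         q, r = divmod(max(m, 0), n)
--         state = [(0 if j == c else state[j]) + q + (1 if 1 <= (j - c) % n <= r else 0)
--                  for j in range(n)]
--         step += 1
--         key = tuple(state)
--         if key in first_seen:
--             return step - first_seen[key]
--         first_seen[key] = step
-- ===== Notes on version B (the rewrite author's own statement) =====
-- stated objective: alternative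
-- what changed: A scans a growing list of states each iteration in two phases and redistributes the max block one unit at a time; B makes a single pass over the state sequence with a dict mapping each state to its first-seen step (cycle length = step - first_seen[state]) and computes each redistribution in closed form with divmod instead of the per-unit inner loop.
-- outside the precondition, e.g. on allocate_b([]): A raises ValueError, B raises ValueError
import Mathlib
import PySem

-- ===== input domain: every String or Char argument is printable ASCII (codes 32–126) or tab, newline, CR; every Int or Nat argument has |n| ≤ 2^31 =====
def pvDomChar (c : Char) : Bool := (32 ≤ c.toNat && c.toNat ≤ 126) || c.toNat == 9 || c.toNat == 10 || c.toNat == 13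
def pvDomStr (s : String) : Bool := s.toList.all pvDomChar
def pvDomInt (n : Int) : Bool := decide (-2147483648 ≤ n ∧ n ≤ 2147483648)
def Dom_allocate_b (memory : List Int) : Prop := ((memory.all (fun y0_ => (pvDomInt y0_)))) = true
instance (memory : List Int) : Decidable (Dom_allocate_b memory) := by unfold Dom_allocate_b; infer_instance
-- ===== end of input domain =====

-- B replaces A's two-phase cycle search with list scans by a one-pass first-seen dict, and does each
-- reallocation in closed form with divmod instead of A's one-unit-at-a-time inner loop (alternative algorithm).
-- The Python A mutates `memory` in place and B does not; the equivalence proved here is about the return value only.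

-- ===== PORT A =====
-- the body of the redistribution loop: memory[(cur_index + i) % len(memory)] += 1
def pvBump (c : Int) (a : List Int) (i : Int) : List Int :=
  let idx := PySem.Int.mod (c + i) ((a.length : Int))
  PySem.List.pySetD a idx (PySem.List.pyGetD a idx 0 + 1)

-- one reallocation cycle of A: zero the (first) maximal block, hand its units out one by one
def pvStep (mem : List Int) : List Int :=
  match PySem.List.max? mem (fun y => y) with
  | none => mem
  | some curMax =>
    let curIndex : Nat := (PySem.List.index? mem curMax).getD 0
    let mem1 := mem.set curIndex 0
    (PySem.List.pyRange 1 (curMax + 1)).foldl (pvBump (curIndex : Int)) mem1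

-- fuel bound for A: 2 * (number of possible states) + 2; the loop returns long before it runs out,
-- the fuel only makes the recursion structurally terminating
def pvL (mem : List Int) : Int := (pvStep mem).foldl min 0
def pvS (mem : List Int) : Int := (pvStep mem).sum
def pvU (mem : List Int) : Int := pvS mem - ((mem.length : Int) - 1) * pvL mem
def pvB (mem : List Int) : Nat := (pvU mem - pvL mem + 1).toNat
def pvFuel (mem : List Int) : Nat := 2 * (pvB mem ^ mem.length) + 2

def pvLoopA : Nat → List Int → List (List Int) → Option (List Int) → Int → Int
  | 0, _, _, _, _ => 0
  | fuel + 1, mem, seen, tester, steps =>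
    let steps' := if tester.isSome then steps + 1 else steps
    let cur := pvStep mem
    if seen.contains cur then
      match tester with
      | some _ => steps'
      | none => pvLoopA fuel cur [cur] (some cur) steps'
    else
      pvLoopA fuel cur (seen ++ [cur]) tester steps'

def allocate_b (memory : List Int) : Int := pvLoopA (pvFuel memory) memory [] none 0

-- ===== PORT B =====
-- one reallocation of B: q, r = divmod(max(m, 0), n); every cell gets q, the r cells after c one more
def pvStepB (state : List Int) : List Int :=
  match PySem.List.max? state (fun y => y) with
  | none => state
  | some m =>
    let n : Nat := state.length
    let c : Nat := (PySem.List.index? state m).getD 0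
    let q : Int := PySem.Int.floordiv (max m 0) (n : Int)
    let r : Int := PySem.Int.mod (max m 0) (n : Int)
    (PySem.List.pyRange 0 (n : Int)).map (fun j =>
      (if j = (c : Int) then 0 else PySem.List.pyGetD state j 0) + q +
      (if 1 ≤ PySem.Int.mod (j - (c : Int)) ((n : Int)) ∧
            PySem.Int.mod (j - (c : Int)) ((n : Int)) ≤ r then 1 else 0))

-- fuel bound for B, computed from B's own step (same shape of bound as A's)
def pvLB (mem : List Int) : Int := (pvStepB mem).foldl min 0
def pvSB (mem : List Int) : Int := (pvStepB mem).sum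
def pvUB (mem : List Int) : Int := pvSB mem - ((mem.length : Int) - 1) * pvLB mem
def pvBB (mem : List Int) : Nat := (pvUB mem - pvLB mem + 1).toNat
def pvFuelB (mem : List Int) : Nat := 2 * (pvBB mem ^ mem.length) + 2

def pvLoopB : Nat → List Int → PySem.Dict (List Int) Int → Int → Int
  | 0, _, _, _ => 0
  | fuel + 1, state, firstSeen, step =>
    let cur := pvStepB state
    let step' := step + 1
    match firstSeen.get? cur with
    | some f => step' - f
    | none => pvLoopB fuel cur (firstSeen.insert cur step') step'

def allocate_b_alt (memory : List Int) : Int := pvLoopB (pvFuelB memory) memory PySem.Dict.empty 0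

-- ===== PRECONDITION & SPEC =====
-- Pre_ excludes only the empty list, on which Python's max([]) raises ValueError (in A and in B alike).
def Pre_allocate_b (memory : List Int) : Prop := memory ≠ []
instance (memory : List Int) : Decidable (Pre_allocate_b memory) := by unfold Pre_allocate_b; infer_instance
def pvWitness_allocate_b : List Int := ([0, 2, 7, 0])

def Spec_allocate_b (memory : List Int) (out : Int) : Prop := out = allocate_b_alt memory
instance (memory : List Int) (out : Int) : Decidable (Spec_allocate_b memory out) := by unfold Spec_allocate_b; infer_instance

-- ===== CLAIM (what is proved, stated in full; the proofs are below) =====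
def Claim_equal_allocate_b : Prop := ∀ (memory : List Int), Dom_allocate_b memory → Pre_allocate_b memory → Spec_allocate_b memory (allocate_b memory)

-- ===== LEMMAS AND PROOFS =====

-- the trajectory of memory states: pvSeq m k = state after k reallocation cycles of A
def pvSeq (m : List Int) (k : Nat) : List Int := pvStep^[k] m

theorem pvSeq_succ (m : List Int) (k : Nat) : pvSeq m (k + 1) = pvStep (pvSeq m k) := by
  simp [pvSeq, Function.iterate_succ_apply']

-- ---- arithmetic helpers ----
theorem sum_set_int (l : List Int) (p : Nat) (v : Int) (hp : p < l.length) :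
    (l.set p v).sum = l.sum - l[p] + v := by
  induction l generalizing p with
  | nil => simp at hp
  | cons x xs ih =>
    cases p with
    | zero => simp [List.set]; ring
    | succ q =>
      simp only [List.set, List.sum_cons]
      rw [ih q (by simpa using hp)]
      simp; ring

theorem foldl_min_le_init (l : List Int) (a : Int) : l.foldl min a ≤ a := by
  induction l generalizing a with
  | nil => simp
  | cons x xs ih => exact le_trans (ih (min a x)) (min_le_left _ _)

theorem foldl_min_le_mem (l : List Int) (a : Int) : ∀ x ∈ l, l.foldl min a ≤ x := by
  induction l generalizing a with
  | nil => simp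
  | cons y ys ih =>
    intro x hx
    rcases List.mem_cons.1 hx with h | h
    · subst h; exact le_trans (foldl_min_le_init ys (min a x)) (min_le_right _ _)
    · exact ih (min a y) x h

theorem sum_ge_length_mul (L : Int) (l : List Int) (h : ∀ y ∈ l, L ≤ y) :
    (l.length : Int) * L ≤ l.sum := by
  induction l with
  | nil => simp
  | cons x xs ih =>
    have hx := h x (by simp)
    have hxs := ih (fun y hy => h y (List.mem_cons_of_mem _ hy))
    simp only [List.length_cons, List.sum_cons]
    push_cast
    nlinarith

-- ---- facts about one bump (one += 1 in A's redistribution loop) ----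
theorem pvBump_set (c i : Int) (a : List Int) (ha : a ≠ []) :
    ∃ t : Nat, t < a.length ∧ (PySem.Int.mod (c + i) ((a.length : Int))) = (t : Int) ∧
      pvBump c a i = a.set t (a.getD t 0 + 1) := by
  have hn : 0 < a.length := List.length_pos_iff.2 ha
  have hnI : (0 : Int) < (a.length : Int) := by exact_mod_cast hn
  set idx := PySem.Int.mod (c + i) ((a.length : Int)) with hidx
  have h0 : 0 ≤ idx := PySem.Int.mod_nonneg _ hnI
  have h1 : idx < (a.length : Int) := PySem.Int.mod_lt _ hnI
  have h1n : idx.toNat < a.length := by omega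
  refine ⟨idx.toNat, h1n, (Int.toNat_of_nonneg h0).symm, ?_⟩
  have hget : PySem.List.pyGetD a idx 0 = a[idx.toNat] :=
    PySem.List.pyGetD_eq_getElem _ _ h0 h1
  have hgd : a.getD idx.toNat 0 = a[idx.toNat] := by
    rw [List.getD_eq_getElem?_getD, List.getElem?_eq_getElem h1n, Option.getD_some]
  simp only [pvBump, ← hidx, hget, hgd]
  rw [PySem.List.pySetD_of_nonneg]
  exact h0

theorem pvBump_facts (c i : Int) (a : List Int) (ha : a ≠ []) :
    (pvBump c a i).length = a.length ∧
    (pvBump c a i).sum = a.sum + 1 ∧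
    (∀ L : Int, (∀ x ∈ a, L ≤ x) → ∀ x ∈ pvBump c a i, L ≤ x) ∧
    (∀ p : Nat, a.getD p 0 ≤ (pvBump c a i).getD p 0) := by
  obtain ⟨t, htl, htv, hset⟩ := pvBump_set c i a ha
  have hgd : a.getD t 0 = a[t]'htl := by
    rw [List.getD_eq_getElem?_getD, List.getElem?_eq_getElem htl, Option.getD_some]
  refine ⟨by simp [hset], ?_, ?_, ?_⟩
  · rw [hset, sum_set_int a t _ htl, hgd]; ring
  · intro L hL x hx
    rw [hset] at hx
    rcases List.mem_or_eq_of_mem_set hx with h | h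
    · exact hL x h
    · subst h
      rw [hgd]
      have := hL _ (List.getElem_mem htl)
      omega
  · intro p
    rw [hset]
    by_cases hp : p = t
    · subst hp
      simp [List.getD_eq_getElem?_getD, htl]
    · rw [List.getD_eq_getElem?_getD, List.getD_eq_getElem?_getD, List.getElem?_set_ne (by omega)]

theorem pvBump_getD (c i : Int) (a : List Int) (ha : a ≠ []) (j : Nat) (_hj : j < a.length) :
    (pvBump c a i).getD j 0 = a.getD j 0 +
      (if PySem.Int.mod (c + i) ((a.length : Int)) = (j : Int) then 1 else 0) := by
  obtain ⟨t, htl, htv, hset⟩ := pvBump_set c i a ha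
  rw [hset, htv]
  by_cases hp : j = t
  · subst hp
    simp [List.getD_eq_getElem?_getD, htl]
  · rw [List.getD_eq_getElem?_getD, List.getD_eq_getElem?_getD, List.getElem?_set_ne (by omega)]
    have htj : t ≠ j := fun hcon => hp hcon.symm
    have : ((t : Int)) ≠ ((j : Int)) := by exact_mod_cast htj
    simp [this]

-- ---- facts about A's whole redistribution fold ----
theorem pvFold_facts (c : Int) (l : List Int) :
    ∀ (a : List Int), a ≠ [] →
    (l.foldl (pvBump c) a).length = a.length ∧
    (l.foldl (pvBump c) a).sum = a.sum + l.length ∧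
    (∀ L : Int, (∀ x ∈ a, L ≤ x) → ∀ x ∈ l.foldl (pvBump c) a, L ≤ x) ∧
    (∀ p : Nat, a.getD p 0 ≤ (l.foldl (pvBump c) a).getD p 0) := by
  induction l with
  | nil => intro a ha; simp
  | cons i t ih =>
    intro a ha
    obtain ⟨hlen, hsum, hlow, hmono⟩ := pvBump_facts c i a ha
    have hne : pvBump c a i ≠ [] := by
      intro h; rw [h] at hlen; simp at hlen; exact ha (List.length_eq_zero_iff.1 hlen.symm)
    obtain ⟨ihlen, ihsum, ihlow, ihmono⟩ := ih (pvBump c a i) hne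
    refine ⟨by simp [List.foldl_cons, ihlen, hlen], ?_, ?_, ?_⟩
    · simp only [List.foldl_cons, List.length_cons]
      rw [ihsum, hsum]; push_cast; ring
    · intro L hL x hx
      exact ihlow L (hlow L hL) x hx
    · intro p
      exact le_trans (hmono p) (ihmono p)

-- A's fold, cell by cell: each cell gains the number of loop indices i that hit it
theorem pvFold_cnt (c : Int) (l : List Int) :
    ∀ (a : List Int), a ≠ [] → ∀ j : Nat, j < a.length →
    (l.foldl (pvBump c) a).getD j 0 = a.getD j 0 +
      ((l.countP (fun i => PySem.Int.mod (c + i) ((a.length : Int)) == ((j : Nat) : Int))) : Int) := by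
  induction l with
  | nil => intro a ha j hj; simp
  | cons i t ih =>
    intro a ha j hj
    obtain ⟨hlen, -, -, -⟩ := pvBump_facts c i a ha
    have hne : pvBump c a i ≠ [] := by
      intro h; rw [h] at hlen; simp at hlen; exact ha (List.length_eq_zero_iff.1 hlen.symm)
    rw [List.foldl_cons, ih (pvBump c a i) hne j (by omega), pvBump_getD c i a ha j hj,
      List.countP_cons, hlen]
    by_cases hx : PySem.Int.mod (c + i) ((a.length : Int)) = ((j : Nat) : Int)
    · have : (PySem.Int.mod (c + i) ((a.length : Int)) == ((j : Nat) : Int)) = true := beq_iff_eq.2 hx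
      simp only [this, if_pos hx]
      push_cast; ring
    · have : (PySem.Int.mod (c + i) ((a.length : Int)) == ((j : Nat) : Int)) = false := beq_eq_false_iff_ne.2 hx
      simp only [this, if_neg hx]
      push_cast; ring

-- ---- characterisation of pvStep on a nonempty list ----
theorem pvStep_eq (m : List Int) (hm : m ≠ []) :
    ∃ (M : Int) (c : Nat) (hc : c < m.length),
      m[c] = M ∧ (∀ y ∈ m, y ≤ M) ∧
      PySem.List.max? m (fun y => y) = some M ∧ PySem.List.index? m M = some c ∧
      pvStep m = (PySem.List.pyRange 1 (M + 1)).foldl (pvBump (c : Int)) (m.set c 0) := by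
  rcases hmax : PySem.List.max? m (fun y => y) with _ | M
  · exact absurd ((PySem.List.max?_eq_none_iff _ _).1 hmax) hm
  · have hMmem : M ∈ m := PySem.List.max?_mem hmax
    have hMmax : ∀ y ∈ m, y ≤ M := by
      intro y hy; simpa using PySem.List.max?_isMax hmax y hy
    rcases hidx : PySem.List.index? m M with _ | c
    · rw [PySem.List.index?_eq_none_iff] at hidx; exact absurd hMmem hidx
    · obtain ⟨hc, hgc, -⟩ := PySem.List.getElem_of_index?_eq_some hidx
      refine ⟨M, c, hc, hgc, hMmax, rfl, hidx, ?_⟩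
      simp only [pvStep, hmax, hidx, Option.getD_some]

theorem pvStep_length (m : List Int) : (pvStep m).length = m.length := by
  by_cases hm : m = []
  · subst hm; rfl
  · obtain ⟨M, c, hc, hgc, hMmax, -, -, heq⟩ := pvStep_eq m hm
    have hne : m.set c 0 ≠ [] := by
      intro hcon
      have hll : (m.set c 0).length = 0 := by rw [hcon]; rfl
      rw [List.length_set] at hll; omega
    rw [heq, (pvFold_facts _ _ _ hne).1, List.length_set]

theorem pvStep_lower (m : List Int) (L : Int) (hL0 : L ≤ 0) (h : ∀ x ∈ m, L ≤ x) :
    ∀ x ∈ pvStep m, L ≤ x := by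
  by_cases hm : m = []
  · subst hm; simp [pvStep, PySem.List.max?]
  · obtain ⟨M, c, hc, hgc, hMmax, -, -, heq⟩ := pvStep_eq m hm
    rw [heq]
    have hne : m.set c 0 ≠ [] := by
      intro hcon
      have hll : (m.set c 0).length = 0 := by rw [hcon]; rfl
      rw [List.length_set] at hll; omega
    refine (pvFold_facts _ _ _ hne).2.2.1 L ?_
    intro x hx
    rcases List.mem_or_eq_of_mem_set hx with hx | hx
    · exact h x hx
    · omega

theorem pvStep_sum (m : List Int) (hm : m ≠ []) (hx : ∃ x ∈ m, 0 ≤ x) :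
    (pvStep m).sum = m.sum := by
  obtain ⟨M, c, hc, hgc, hMmax, -, -, heq⟩ := pvStep_eq m hm
  obtain ⟨x, hxm, hx0⟩ := hx
  have hM0 : 0 ≤ M := le_trans hx0 (hMmax x hxm)
  have hne : m.set c 0 ≠ [] := by
    intro hcon
    have hll : (m.set c 0).length = 0 := by rw [hcon]; rfl
    rw [List.length_set] at hll; omega
  rw [heq, (pvFold_facts _ _ _ hne).2.1, sum_set_int m c 0 hc, hgc,
    PySem.List.length_pyRange_one]
  omega

theorem pvStep_nonneg (m : List Int) (hm : m ≠ []) : ∃ x ∈ pvStep m, 0 ≤ x := by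
  obtain ⟨M, c, hc, hgc, hMmax, -, -, heq⟩ := pvStep_eq m hm
  have hne : m.set c 0 ≠ [] := by
    intro hcon
    have hll : (m.set c 0).length = 0 := by rw [hcon]; rfl
    rw [List.length_set] at hll; omega
  obtain ⟨hlen, -, -, hmono⟩ := pvFold_facts (c : Int) (PySem.List.pyRange 1 (M + 1)) (m.set c 0) hne
  have hc' : c < (pvStep m).length := by rw [pvStep_length]; exact hc
  refine ⟨(pvStep m)[c], List.getElem_mem hc', ?_⟩
  have h0 : (m.set c 0).getD c 0 = 0 := by
    simp [List.getD_eq_getElem?_getD, hc]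
  have := hmono c
  rw [h0, ← heq] at this
  rwa [List.getD_eq_getElem?_getD, List.getElem?_eq_getElem hc', Option.getD_some] at this

-- ---- B's closed-form reallocation computes A's reallocation ----

-- counting multiples of n in a window, at the Nat level
theorem pvCntCore (n d : Nat) (hn : 0 < n) (hd : d < n) :
    ∀ k : Nat, (List.range k).countP (fun t => (t+1) % n == d) = k / n + (if 1 ≤ d ∧ d ≤ k % n then 1 else 0) := by
  intro k
  induction k with
  | zero =>
    simp only [List.range_zero, List.countP_nil, Nat.zero_div, Nat.zero_mod]
    split_ifs <;> omega
  | succ k ih =>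
    rw [List.range_succ, List.countP_append, ih]
    have hr : k % n < n := Nat.mod_lt k hn
    have hdm := Nat.div_add_mod k n
    by_cases hcase : k % n + 1 < n
    · have e1 : k + 1 = (k % n + 1) + n * (k / n) := by omega
      have e2 : (k+1) % n = k % n + 1 := by
        rw [e1, Nat.add_mul_mod_self_left, Nat.mod_eq_of_lt hcase]
      have e3 : (k+1) / n = k / n := by
        rw [e1, Nat.add_mul_div_left _ _ hn, Nat.div_eq_of_lt hcase]; omega
      simp only [List.countP_cons, List.countP_nil, e2, e3, beq_iff_eq]
      split_ifs <;> omega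
    · have hrn : k % n + 1 = n := by omega
      have e0 : n * (k / n + 1) = n * (k / n) + n := by ring
      have e1 : k + 1 = 0 + n * (k / n + 1) := by omega
      have e2 : (k+1) % n = 0 := by rw [e1, Nat.add_mul_mod_self_left, Nat.zero_mod]
      have e3 : (k+1) / n = k / n + 1 := by
        rw [e1, Nat.add_mul_div_left _ _ hn, Nat.zero_div, Nat.zero_add]
      simp only [List.countP_cons, List.countP_nil, e2, e3, beq_iff_eq]
      split_ifs <;> omega

theorem pvResidue (i c j n : Nat) (hc : c < n) (hj : j < n) :
    ((c + 1 + i) % n = j) ↔ ((i + 1) % n = (j + n - c) % n) := by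
  have key : ∀ x, ((c + x) % n = j) ↔ (x % n = (j + n - c) % n) := by
    intro x
    constructor
    · intro h
      have h2 : c + x ≡ j [MOD n] := by rw [Nat.ModEq, h, Nat.mod_eq_of_lt hj]
      have h3 : c + x + (n - c) ≡ j + (n - c) [MOD n] := h2.add_right _
      have e : c + x + (n - c) = x + n := by omega
      have e2 : j + (n - c) = j + n - c := by omega
      rw [e, e2] at h3
      have h4 : x ≡ x + n [MOD n] := (Nat.add_mod_right x n).symm
      exact h4.trans h3
    · intro h
      have h2 : x ≡ j + n - c [MOD n] := h
      have h3 : c + x ≡ c + (j + n - c) [MOD n] := h2.add_left c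
      have e : c + (j + n - c) = j + n := by omega
      rw [e] at h3
      have h4 : j + n ≡ j [MOD n] := Nat.add_mod_right j n
      have h5 : (c + x) % n = j % n := h3.trans h4
      rwa [Nat.mod_eq_of_lt hj] at h5
  have e : c + 1 + i = c + (i + 1) := by omega
  rw [e]
  exact key (i + 1)

-- B's offset (j - c) % n, as a Nat
theorem pvDnat (c j n : Nat) (hn : 0 < n) (hc : c < n) :
    PySem.Int.mod ((j : Int) - (c : Int)) (n : Int) = (((j + n - c) % n : Nat) : Int) := by
  have hn' : (0:Int) < (n:Int) := by exact_mod_cast hn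
  rw [PySem.Int.mod_eq_emod_of_pos hn']
  have e : (j:Int) - (c:Int) = ((j + n - c : Nat) : Int) - (n:Int) := by omega
  rw [e, Int.sub_emod_right]
  exact (Int.natCast_mod _ _).symm

-- the count of A's loop indices hitting cell j IS B's closed form q + (1 if 1 <= (j-c)%n <= r else 0)
theorem pvCntInt (n c j : Nat) (M : Int) (hn : 0 < n) (hc : c < n) (hj : j < n) :
    (((PySem.List.pyRange 1 (M+1)).countP
        (fun i => PySem.Int.mod ((c:Int) + i) ((n:Int)) == ((j:Int)))) : Int)
    = PySem.Int.floordiv (max M 0) (n:Int)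
      + (if 1 ≤ PySem.Int.mod ((j:Int) - (c:Int)) ((n:Int)) ∧
            PySem.Int.mod ((j:Int) - (c:Int)) ((n:Int)) ≤ PySem.Int.mod (max M 0) ((n:Int))
         then 1 else 0) := by
  have hmax : max M 0 = ((M.toNat : Nat) : Int) := (Int.toNat_eq_max M).symm
  set k := M.toNat with hk
  have hrange : PySem.List.pyRange 1 (M+1) = (List.range k).map (fun t : Nat => (1:Int) + (t:Int)) := by
    have e : (M + 1 - 1).toNat = k := by omega
    rw [PySem.List.pyRange_one, e]
  rw [hrange, hmax, List.countP_map, PySem.Int.floordiv_natCast, PySem.Int.mod_natCast,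
    pvDnat c j n hn hc]
  have hpred : ∀ t ∈ List.range k,
      (((fun i => PySem.Int.mod ((c:Int) + i) ((n:Int)) == ((j:Int))) ∘ (fun t : Nat => (1:Int) + (t:Int))) t = true)
      ↔ ((fun t => (t+1) % n == (j + n - c) % n) t = true) := by
    intro t _
    simp only [Function.comp, beq_iff_eq]
    have e : (c:Int) + ((1:Int) + (t:Int)) = ((c + 1 + t : Nat) : Int) := by push_cast; ring
    rw [e, PySem.Int.mod_natCast]
    constructor
    · intro h
      exact (pvResidue t c j n hc hj).1 (by exact_mod_cast h)
    · intro h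
      exact_mod_cast (pvResidue t c j n hc hj).2 h
  rw [List.countP_congr hpred, pvCntCore n ((j + n - c) % n) hn (Nat.mod_lt _ hn)]
  push_cast
  split_ifs with h1 h2 h3 <;> push_cast at * <;> omega

-- getD of the zeroed-out list
theorem pvSetZero_getD (m : List Int) (c j : Nat) (hc : c < m.length) (hj : j < m.length) :
    (m.set c 0).getD j 0 = if j = c then 0 else m.getD j 0 := by
  by_cases hp : j = c
  · subst hp
    simp [List.getD_eq_getElem?_getD, hj]
  · rw [List.getD_eq_getElem?_getD, List.getD_eq_getElem?_getD, List.getElem?_set_ne (by omega)]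
    simp [hp]

-- THE key lemma: B's step is A's step
theorem pvStepB_eq (m : List Int) : pvStepB m = pvStep m := by
  by_cases hm : m = []
  · subst hm; rfl
  · obtain ⟨M, c, hc, hgc, hMmax, hmax, hidx, heq⟩ := pvStep_eq m hm
    have hn : 0 < m.length := List.length_pos_iff.2 hm
    set n := m.length with hnn
    have hB : pvStepB m = (PySem.List.pyRange 0 (n : Int)).map (fun j =>
        (if j = (c : Int) then 0 else PySem.List.pyGetD m j 0)
          + PySem.Int.floordiv (max M 0) (n : Int) +
        (if 1 ≤ PySem.Int.mod (j - (c : Int)) ((n : Int)) ∧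
              PySem.Int.mod (j - (c : Int)) ((n : Int)) ≤ PySem.Int.mod (max M 0) (n : Int)
         then 1 else 0)) := by
      simp only [pvStepB, hmax, hidx, Option.getD_some]
      simp only [← hnn]
    have hne : m.set c 0 ≠ [] := by
      intro hcon
      have hll : (m.set c 0).length = 0 := by rw [hcon]; rfl
      rw [List.length_set] at hll; omega
    have hA : pvStep m = (PySem.List.pyRange 1 (M + 1)).foldl (pvBump (c : Int)) (m.set c 0) := heq
    have hlenA : (pvStep m).length = n := pvStep_length m
    rw [hB]
    have hrange0 : PySem.List.pyRange 0 (n : Int) = (List.range n).map (fun t : Nat => (t : Int)) := by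
      rw [PySem.List.pyRange_one]
      have e : ((n : Int) - 0).toNat = n := by omega
      rw [e]
      simp
    rw [hrange0, List.map_map]
    apply List.ext_getElem
    · simpa using hlenA.symm
    · intro j h1 h2
      have hjn : j < n := by simpa using h1
      rw [List.getElem_map, List.getElem_range]
      have hset_len : (m.set c 0).length = n := by rw [List.length_set]
      have hgetA : (pvStep m)[j]'h2 = (pvStep m).getD j 0 := by
        rw [List.getD_eq_getElem?_getD, List.getElem?_eq_getElem h2, Option.getD_some]
      rw [hgetA, hA, pvFold_cnt (c : Int) _ (m.set c 0) hne j (by omega)]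
      have hdiv : ((m.set c 0).length : Int) = (n : Int) := by rw [hset_len]
      simp only [Function.comp, hdiv]
      rw [pvCntInt n c j M hn (by omega) hjn, pvSetZero_getD m c j hc hjn]
      have hje : ((j : Nat) : Int) = (c : Int) ↔ j = c := Nat.cast_inj
      have hgd : PySem.List.pyGetD m ((j : Nat) : Int) 0 = m.getD j 0 := PySem.List.pyGetD_natCast ..
      by_cases hjc : j = c
      · simp [hjc]
      · have : ¬ (((j : Nat) : Int) = (c : Int)) := fun hcon => hjc (hje.1 hcon)
        rw [if_neg this, if_neg hjc, hgd]
        ring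

-- B's fuel is A's fuel
theorem pvFuelB_eq (m : List Int) : pvFuelB m = pvFuel m := by
  simp only [pvFuelB, pvFuel, pvBB, pvB, pvUB, pvU, pvSB, pvS, pvLB, pvL, pvStepB_eq]

-- ---- the invariant along the trajectory ----
def pvInv (m0 m : List Int) : Prop :=
  m.length = m0.length ∧ (∀ x ∈ m, pvL m0 ≤ x) ∧ m.sum = pvS m0 ∧ ∃ x ∈ m, 0 ≤ x

theorem pvL_nonpos (m0 : List Int) : pvL m0 ≤ 0 := foldl_min_le_init _ _

theorem pvInv_one (m0 : List Int) (h : m0 ≠ []) : pvInv m0 (pvStep m0) :=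
  ⟨pvStep_length m0, fun x hx => foldl_min_le_mem _ _ x hx, rfl, pvStep_nonneg m0 h⟩

theorem pvInv_step (m0 m : List Int) (h0 : m0 ≠ []) (h : pvInv m0 m) : pvInv m0 (pvStep m) := by
  obtain ⟨hlen, hlow, hsum, hnn⟩ := h
  have hm : m ≠ [] := by
    intro hcon; subst hcon
    exact h0 (List.length_eq_zero_iff.1 (by simp at hlen; omega))
  exact ⟨by rw [pvStep_length, hlen],
    pvStep_lower m _ (pvL_nonpos m0) hlow,
    by rw [pvStep_sum m hm hnn, hsum],
    pvStep_nonneg m hm⟩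

theorem pvInv_seq (m0 : List Int) (h0 : m0 ≠ []) : ∀ k, 1 ≤ k → pvInv m0 (pvSeq m0 k) := by
  intro k
  induction k with
  | zero => omega
  | succ n ih =>
    intro _
    rcases Nat.eq_or_lt_of_le (Nat.one_le_iff_ne_zero.2 (Nat.succ_ne_zero n)) with h | h
    · rw [pvSeq_succ]
      have : n = 0 := by omega
      subst this
      exact pvInv_one m0 h0
    · rw [pvSeq_succ]
      exact pvInv_step m0 _ h0 (ih (by omega))

theorem pvInv_upper (m0 m : List Int) (h : pvInv m0 m) : ∀ x ∈ m, x ≤ pvU m0 := by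
  obtain ⟨hlen, hlow, hsum, -⟩ := h
  intro x hx
  obtain ⟨s, t, rfl⟩ := List.append_of_mem hx
  have hs : ((s.length : Int)) * pvL m0 ≤ s.sum :=
    sum_ge_length_mul _ s (fun y hy => hlow y (by simp [hy]))
  have ht : ((t.length : Int)) * pvL m0 ≤ t.sum :=
    sum_ge_length_mul _ t (fun y hy => hlow y (by simp [hy]))
  have hsum' : s.sum + (x + t.sum) = pvS m0 := by
    simpa using hsum
  have hlen' : (s.length : Int) + (t.length : Int) = (m0.length : Int) - 1 := by
    simp at hlen; omega
  have : ((s.length : Int) + (t.length : Int)) * pvL m0 ≤ s.sum + t.sum := by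
    rw [add_mul]; exact add_le_add hs ht
  rw [hlen'] at this
  simp only [pvU]
  nlinarith [this, hsum']

-- ---- encoding states as numbers, for the pigeonhole bound ----
def pvEnc (L : Int) (B : Nat) : List Int → Nat
  | [] => 0
  | x :: xs => (x - L).toNat + B * pvEnc L B xs

theorem pvEnc_lt (L U : Int) (B : Nat) (hB : B = (U - L + 1).toNat) :
    ∀ (m : List Int), (∀ x ∈ m, L ≤ x ∧ x ≤ U) → pvEnc L B m < B ^ m.length := by
  intro m
  induction m with
  | nil => intro _; simp [pvEnc]
  | cons x xs ih =>
    intro h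
    obtain ⟨hxL, hxU⟩ := h x (by simp)
    have hx : (x - L).toNat < B := by omega
    have htail := ih (fun y hy => h y (by simp [hy]))
    have hB1 : 1 ≤ B := by omega
    calc pvEnc L B (x :: xs) = (x - L).toNat + B * pvEnc L B xs := rfl
    _ < B + B * pvEnc L B xs := by omega
    _ = B * (1 + pvEnc L B xs) := by ring
    _ ≤ B * B ^ xs.length := Nat.mul_le_mul_left B (by omega)
    _ = B ^ (x :: xs).length := by rw [List.length_cons, pow_succ]; ring

theorem pvEnc_inj (L U : Int) (B : Nat) (hB : B = (U - L + 1).toNat) :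
    ∀ (p q : List Int), (∀ x ∈ p, L ≤ x ∧ x ≤ U) → (∀ x ∈ q, L ≤ x ∧ x ≤ U) →
      p.length = q.length → pvEnc L B p = pvEnc L B q → p = q := by
  intro p
  induction p with
  | nil =>
    intro q _ _ hlen _
    exact (List.length_eq_zero_iff.1 (by simpa using hlen.symm)).symm ▸ rfl
  | cons x xs ih =>
    intro q hp hq hlen henc
    cases q with
    | nil => simp at hlen
    | cons y ys =>
      obtain ⟨hxL, hxU⟩ := hp x (by simp)
      obtain ⟨hyL, hyU⟩ := hq y (by simp)
      have hxB : (x - L).toNat < B := by omega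
      have hyB : (y - L).toNat < B := by omega
      have henc' : (x - L).toNat + B * pvEnc L B xs = (y - L).toNat + B * pvEnc L B ys := henc
      have hmod := congrArg (fun z => z % B) henc'
      simp only [Nat.add_mul_mod_self_left] at hmod
      rw [Nat.mod_eq_of_lt hxB, Nat.mod_eq_of_lt hyB] at hmod
      have hxy : x = y := by omega
      have htail : pvEnc L B xs = pvEnc L B ys := by
        have hB0 : 0 < B := by omega
        have : B * pvEnc L B xs = B * pvEnc L B ys := by omega
        exact Nat.eq_of_mul_eq_mul_left hB0 this
      have := ih ys (fun z hz => hp z (by simp [hz])) (fun z hz => hq z (by simp [hz]))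
        (by simpa using hlen) htail
      rw [hxy, this]

-- ---- pigeonhole: some state repeats within pvB^n + 1 cycles ----
theorem pv_exists_dup (m0 : List Int) (h0 : m0 ≠ []) :
    ∃ t, (1 ≤ t ∧ ∃ k, 1 ≤ k ∧ k < t ∧ pvSeq m0 k = pvSeq m0 t) ∧ t ≤ pvB m0 ^ m0.length + 1 := by
  set N := pvB m0 ^ m0.length with hN
  have hval : ∀ k : Nat, 1 ≤ k → (∀ x ∈ pvSeq m0 k, pvL m0 ≤ x ∧ x ≤ pvU m0) ∧ (pvSeq m0 k).length = m0.length := by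
    intro k hk
    have h := pvInv_seq m0 h0 k hk
    exact ⟨fun x hx => ⟨h.2.1 x hx, pvInv_upper m0 _ h x hx⟩, h.1⟩
  have hmaps : ∀ k ∈ Finset.range (N + 1), pvEnc (pvL m0) (pvB m0) (pvSeq m0 (k + 1)) ∈ Finset.range N := by
    intro k _
    obtain ⟨hv, hl⟩ := hval (k + 1) (by omega)
    have := pvEnc_lt (pvL m0) (pvU m0) (pvB m0) rfl (pvSeq m0 (k + 1)) hv
    rw [hl] at this
    simpa [hN] using this
  have hcard : (Finset.range N).card < (Finset.range (N + 1)).card := by simp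
  obtain ⟨x, hx, y, hy, hxy, heq⟩ :=
    Finset.exists_ne_map_eq_of_card_lt_of_maps_to hcard hmaps
  have hseq : pvSeq m0 (x + 1) = pvSeq m0 (y + 1) := by
    obtain ⟨hvx, hlx⟩ := hval (x + 1) (by omega)
    obtain ⟨hvy, hly⟩ := hval (y + 1) (by omega)
    exact pvEnc_inj (pvL m0) (pvU m0) (pvB m0) rfl _ _ hvx hvy (by omega) heq
  simp only [Finset.mem_range] at hx hy
  rcases Nat.lt_or_ge x y with h | h
  · exact ⟨y + 1, ⟨by omega, x + 1, by omega, by omega, hseq⟩, by omega⟩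
  · have hxy' : y < x := by omega
    exact ⟨x + 1, ⟨by omega, y + 1, by omega, by omega, hseq.symm⟩, by omega⟩

-- ---- small list/dict utilities used by the loop proofs ----
theorem contains_mem (l : List (List Int)) (x : List Int) : l.contains x = true ↔ x ∈ l := by
  simp

theorem range'_succ_own (s n : Nat) : List.range' s (n + 1) = s :: List.range' (s + 1) n := rfl

theorem range'_concat_own (s n : Nat) : List.range' s (n + 1) = List.range' s n ++ [s + n] := by
  induction n generalizing s with
  | zero => rfl
  | succ k ih =>
    have e : s + 1 + k = s + (k + 1) := by omega
    rw [range'_succ_own, ih (s + 1), range'_succ_own s k, e]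
    rfl

theorem mem_range'_own (m s n : Nat) : m ∈ List.range' s n ↔ s ≤ m ∧ m < s + n := by
  induction n generalizing s with
  | zero => simp
  | succ k ih =>
    rw [range'_succ_own, List.mem_cons, ih (s + 1)]
    omega

theorem dict_get?_none (f : Nat → List Int) (g : Nat → Int) (key : List Int) :
    ∀ ks : List Nat, (∀ k ∈ ks, f k ≠ key) →
      (PySem.Dict.mk (ks.map (fun k => (f k, g k)))).get? key = none := by
  intro ks
  induction ks with
  | nil => intro _; rfl
  | cons a t ih =>
    intro h
    rw [List.map_cons, PySem.Dict.get?_mk_cons]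
    have hne : (f a == key) = false := beq_eq_false_iff_ne.2 (h a (List.mem_cons_self))
    rw [hne]
    simp only [Bool.false_eq_true, if_false]
    exact ih (fun k hk => h k (List.mem_cons_of_mem _ hk))

theorem dict_get?_first (f : Nat → List Int) (g : Nat → Int) (key : List Int) (i : Nat)
    (hkey : f i = key) (hmin : ∀ k, 1 ≤ k → k < i → f k ≠ key) :
    ∀ b a : Nat, 1 ≤ a → a ≤ i → i < a + b →
      (PySem.Dict.mk ((List.range' a b).map (fun k => (f k, g k)))).get? key = some (g i) := by
  intro b
  induction b with
  | zero => intro a _ _ h; omega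
  | succ n ih =>
    intro a ha1 hai hib
    rw [range'_succ_own, List.map_cons, PySem.Dict.get?_mk_cons]
    by_cases hai' : a = i
    · subst hai'
      simp [hkey]
    · have hne : (f a == key) = false := beq_eq_false_iff_ne.2 (hmin a ha1 (by omega))
      rw [hne]
      simp only [Bool.false_eq_true, if_false]
      exact ih (a + 1) (by omega) (by omega) (by omega)

-- ---- one-step unfolding equations for the two loops ----
theorem pvLoopA_succ_some (f : Nat) (mem : List Int) (seen : List (List Int)) (T : List Int)
    (steps : Int) :
    pvLoopA (f + 1) mem seen (some T) steps =
      (if seen.contains (pvStep mem) = true then steps + 1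
       else pvLoopA f (pvStep mem) (seen ++ [pvStep mem]) (some T) (steps + 1)) := rfl

theorem pvLoopA_succ_none (f : Nat) (mem : List Int) (seen : List (List Int)) (steps : Int) :
    pvLoopA (f + 1) mem seen none steps =
      (if seen.contains (pvStep mem) = true then
        pvLoopA f (pvStep mem) [pvStep mem] (some (pvStep mem)) steps
       else pvLoopA f (pvStep mem) (seen ++ [pvStep mem]) none steps) := rfl

theorem pvLoopB_succ (f : Nat) (mem : List Int) (d : PySem.Dict (List Int) Int) (step : Int) :
    pvLoopB (f + 1) mem d step =
      (match d.get? (pvStepB mem) with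
       | some fs => step + 1 - fs
       | none => pvLoopB f (pvStepB mem) (d.insert (pvStepB mem) (step + 1)) (step + 1)) := rfl

-- ---- phase 2 of A: tester set, counting the loop length ----
theorem pvLoopA_phase2 (m0 : List Int) (i j : Nat) (T : List Int)
    (h1i : 1 ≤ i) (hij : i < j)
    (hd1 : ∀ a b, 1 ≤ a → a < b → b < j → pvSeq m0 a ≠ pvSeq m0 b)
    (hsij : pvSeq m0 i = pvSeq m0 j) :
    ∀ fuel m : Nat, m < j - i → j - i - m ≤ fuel →
      pvLoopA fuel (pvSeq m0 (j + m)) ((List.range (m + 1)).map (fun k => pvSeq m0 (j + k)))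
        (some T) ((m : Nat) : Int) = ((j - i : Nat) : Int) := by
  have hper : ∀ x, pvSeq m0 (j + x) = pvSeq m0 (i + x) := by
    intro x
    induction x with
    | zero => simpa using hsij.symm
    | succ n ihn =>
      have e1 : j + (n + 1) = (j + n) + 1 := rfl
      have e2 : i + (n + 1) = (i + n) + 1 := rfl
      rw [e1, e2, pvSeq_succ, pvSeq_succ, ihn]
  have hd2 : ∀ a b, j ≤ a → a < b → b < j + (j - i) → pvSeq m0 a ≠ pvSeq m0 b := by
    intro a b hja hab hbj heq
    have ea : j + (a - j) = a := by omega
    have eb : j + (b - j) = b := by omega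
    have ha' : pvSeq m0 a = pvSeq m0 (i + (a - j)) := by rw [← hper (a - j), ea]
    have hb' : pvSeq m0 b = pvSeq m0 (i + (b - j)) := by rw [← hper (b - j), eb]
    exact hd1 (i + (a - j)) (i + (b - j)) (by omega) (by omega) (by omega)
      (by rw [← ha', ← hb', heq])
  intro fuel
  induction fuel with
  | zero => intro m hm hf; omega
  | succ f ih =>
    intro m hm hf
    rw [pvLoopA_succ_some]
    have hcur : pvStep (pvSeq m0 (j + m)) = pvSeq m0 (j + (m + 1)) := (pvSeq_succ m0 (j + m)).symm
    rw [hcur]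
    by_cases hend : m + 1 = j - i
    · have hmem : pvSeq m0 (j + (m + 1)) ∈ (List.range (m + 1)).map (fun k => pvSeq m0 (j + k)) := by
        refine List.mem_map.2 ⟨0, List.mem_range.2 (by omega), ?_⟩
        have e : j + (m + 1) = j + (j - i) := by omega
        have e2 : i + (j - i) = j := by omega
        calc pvSeq m0 (j + 0) = pvSeq m0 j := by rw [Nat.add_zero]
          _ = pvSeq m0 (i + (j - i)) := by rw [e2]
          _ = pvSeq m0 (j + (j - i)) := (hper (j - i)).symm
          _ = pvSeq m0 (j + (m + 1)) := by rw [← e]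
      rw [if_pos ((contains_mem _ _).2 hmem)]
      omega
    · have hnot : ¬ ((List.range (m + 1)).map (fun k => pvSeq m0 (j + k))).contains
          (pvSeq m0 (j + (m + 1))) = true := by
        intro hc
        obtain ⟨k, hk, hkeq⟩ := List.mem_map.1 ((contains_mem _ _).1 hc)
        exact hd2 (j + k) (j + (m + 1)) (by omega)
          (by have := List.mem_range.1 hk; omega)
          (by omega) hkeq
      rw [if_neg hnot]
      have hseen : ((List.range (m + 1)).map (fun k => pvSeq m0 (j + k))) ++ [pvSeq m0 (j + (m + 1))]
          = (List.range (m + 1 + 1)).map (fun k => pvSeq m0 (j + k)) := by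
        rw [show List.range (m + 1 + 1) = List.range (m + 1) ++ [m + 1] from List.range_succ,
          List.map_append]
        simp
      rw [hseen]
      have hcast : ((m : Nat) : Int) + 1 = (((m + 1 : Nat)) : Int) := by push_cast; ring
      rw [hcast]
      exact ih (m + 1) (by omega) (by omega)

-- ---- phase 1 of A: finding the first repeated state ----
theorem pvLoopA_phase1 (m0 : List Int) (i j : Nat)
    (h1i : 1 ≤ i) (hij : i < j)
    (hd1 : ∀ a b, 1 ≤ a → a < b → b < j → pvSeq m0 a ≠ pvSeq m0 b)
    (hsij : pvSeq m0 i = pvSeq m0 j) :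
    ∀ fuel t : Nat, t < j → (j - t) + (j - i) ≤ fuel →
      pvLoopA fuel (pvSeq m0 t) ((List.range' 1 t).map (fun k => pvSeq m0 k)) none 0
        = ((j - i : Nat) : Int) := by
  intro fuel
  induction fuel with
  | zero => intro t ht hf; omega
  | succ f ih =>
    intro t ht hf
    rw [pvLoopA_succ_none]
    have hcur : pvStep (pvSeq m0 t) = pvSeq m0 (t + 1) := (pvSeq_succ m0 t).symm
    rw [hcur]
    by_cases htj : t + 1 = j
    · have hmem : pvSeq m0 (t + 1) ∈ (List.range' 1 t).map (fun k => pvSeq m0 k) := by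
        refine List.mem_map.2 ⟨i, (mem_range'_own i 1 t).2 (by omega), ?_⟩
        rw [htj]
        exact hsij
      rw [if_pos ((contains_mem _ _).2 hmem)]
      have h2 := pvLoopA_phase2 m0 i j (pvSeq m0 (t + 1)) h1i hij hd1 hsij f 0
        (by omega) (by omega)
      have e0 : j + 0 = t + 1 := by omega
      rw [e0] at h2
      have e1 : (List.range (0 + 1)).map (fun k => pvSeq m0 (j + k)) = [pvSeq m0 (t + 1)] := by
        simp [List.range_succ, e0]
      rw [e1] at h2
      simpa using h2
    · have hnot : ¬ ((List.range' 1 t).map (fun k => pvSeq m0 k)).contains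
          (pvSeq m0 (t + 1)) = true := by
        intro hc
        obtain ⟨k, hk, hkeq⟩ := List.mem_map.1 ((contains_mem _ _).1 hc)
        have hk' := (mem_range'_own k 1 t).1 hk
        exact hd1 k (t + 1) (by omega) (by omega) (by omega) hkeq
      rw [if_neg hnot]
      have hseen : ((List.range' 1 t).map (fun k => pvSeq m0 k)) ++ [pvSeq m0 (t + 1)]
          = (List.range' 1 (t + 1)).map (fun k => pvSeq m0 k) := by
        rw [range'_concat_own, List.map_append]
        have e : 1 + t = t + 1 := by omega
        rw [e]
        simp
      rw [hseen]
      exact ih (t + 1) (by omega) (by omega)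

-- ---- B's single pass with the first-seen dictionary ----
theorem pvLoopB_run (m0 : List Int) (i j : Nat)
    (h1i : 1 ≤ i) (hij : i < j)
    (hd1 : ∀ a b, 1 ≤ a → a < b → b < j → pvSeq m0 a ≠ pvSeq m0 b)
    (hsij : pvSeq m0 i = pvSeq m0 j)
    (himin : ∀ k, 1 ≤ k → k < i → pvSeq m0 k ≠ pvSeq m0 j) :
    ∀ fuel t : Nat, t < j → j - t ≤ fuel →
      pvLoopB fuel (pvSeq m0 t)
        (PySem.Dict.mk ((List.range' 1 t).map (fun k => (pvSeq m0 k, ((k : Nat) : Int)))))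
        ((t : Nat) : Int) = ((j : Nat) : Int) - ((i : Nat) : Int) := by
  intro fuel
  induction fuel with
  | zero => intro t ht hf; omega
  | succ f ih =>
    intro t ht hf
    rw [pvLoopB_succ]
    have hcur : pvStepB (pvSeq m0 t) = pvSeq m0 (t + 1) := by
      rw [pvStepB_eq]
      exact (pvSeq_succ m0 t).symm
    rw [hcur]
    by_cases htj : t + 1 = j
    · have hget : (PySem.Dict.mk ((List.range' 1 t).map
          (fun k => (pvSeq m0 k, ((k : Nat) : Int))))).get? (pvSeq m0 (t + 1))
          = some ((i : Nat) : Int) := by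
        refine dict_get?_first (fun k => pvSeq m0 k) (fun k => ((k : Nat) : Int))
          (pvSeq m0 (t + 1)) i ?_ ?_ t 1 (by omega) (by omega) (by omega)
        · rw [htj]; exact hsij
        · intro k hk1 hki hkeq
          exact himin k hk1 hki (by rw [← htj]; exact hkeq)
      rw [hget]
      show ((t : Nat) : Int) + 1 - ((i : Nat) : Int) = _
      omega
    · have hget : (PySem.Dict.mk ((List.range' 1 t).map
          (fun k => (pvSeq m0 k, ((k : Nat) : Int))))).get? (pvSeq m0 (t + 1)) = none := by
        refine dict_get?_none (fun k => pvSeq m0 k) (fun k => ((k : Nat) : Int))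
          (pvSeq m0 (t + 1)) (List.range' 1 t) ?_
        intro k hk
        have hk' := (mem_range'_own k 1 t).1 hk
        exact hd1 k (t + 1) (by omega) (by omega) (by omega)
      rw [hget]
      show pvLoopB f (pvSeq m0 (t + 1)) _ (((t : Nat) : Int) + 1) = _
      have hcont : (PySem.Dict.mk ((List.range' 1 t).map
          (fun k => (pvSeq m0 k, ((k : Nat) : Int))))).contains (pvSeq m0 (t + 1)) = false := by
        rw [← PySem.Dict.get?_eq_none_iff_contains]
        exact hget
      have hins : (PySem.Dict.mk ((List.range' 1 t).map
            (fun k => (pvSeq m0 k, ((k : Nat) : Int))))).insert (pvSeq m0 (t + 1))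
            (((t : Nat) : Int) + 1)
          = PySem.Dict.mk ((List.range' 1 (t + 1)).map
            (fun k => (pvSeq m0 k, ((k : Nat) : Int)))) := by
        apply PySem.Dict.ext
        rw [PySem.Dict.items_insert_of_not_contains]
        · rw [range'_concat_own, List.map_append]
          have e : 1 + t = t + 1 := by omega
          rw [e]
          simp
        · exact hcont
      rw [hins]
      have hcast : ((t : Nat) : Int) + 1 = (((t + 1 : Nat)) : Int) := by push_cast; ring
      rw [hcast]
      exact ih (t + 1) (by omega) (by omega)

-- ---- the main equivalence ----
theorem pv_main (m0 : List Int) (h0 : m0 ≠ []) : allocate_b m0 = allocate_b_alt m0 := by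
  obtain ⟨t0, hQt0, ht0le⟩ := pv_exists_dup m0 h0
  haveI : DecidablePred (fun t => 1 ≤ t ∧ ∃ k, 1 ≤ k ∧ k < t ∧ pvSeq m0 k = pvSeq m0 t) :=
    fun t => Classical.propDecidable _
  have hQ : ∃ t, 1 ≤ t ∧ ∃ k, 1 ≤ k ∧ k < t ∧ pvSeq m0 k = pvSeq m0 t := ⟨t0, hQt0⟩
  have hQj := Nat.find_spec hQ
  have hjle : Nat.find hQ ≤ pvB m0 ^ m0.length + 1 := le_trans (Nat.find_min' hQ hQt0) ht0le
  obtain ⟨hj1, k0, hk01, hk0j, hk0eq⟩ := hQj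
  haveI : DecidablePred (fun k => 1 ≤ k ∧ pvSeq m0 k = pvSeq m0 (Nat.find hQ)) :=
    fun t => Classical.propDecidable _
  have hR : ∃ k, 1 ≤ k ∧ pvSeq m0 k = pvSeq m0 (Nat.find hQ) := ⟨k0, hk01, hk0eq⟩
  have hRi := Nat.find_spec hR
  have h1i : 1 ≤ Nat.find hR := hRi.1
  have hsij : pvSeq m0 (Nat.find hR) = pvSeq m0 (Nat.find hQ) := hRi.2
  have hij : Nat.find hR < Nat.find hQ := lt_of_le_of_lt (Nat.find_min' hR ⟨hk01, hk0eq⟩) hk0j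
  have himin : ∀ k, 1 ≤ k → k < Nat.find hR → pvSeq m0 k ≠ pvSeq m0 (Nat.find hQ) :=
    fun k hk1 hki hkeq => (Nat.find_min hR hki) ⟨hk1, hkeq⟩
  have hd1 : ∀ a b, 1 ≤ a → a < b → b < Nat.find hQ → pvSeq m0 a ≠ pvSeq m0 b :=
    fun a b ha hab hbj heq => (Nat.find_min hQ hbj) ⟨by omega, a, ha, hab, heq⟩
  have hA : allocate_b m0 = ((Nat.find hQ - Nat.find hR : Nat) : Int) := by
    unfold allocate_b
    exact pvLoopA_phase1 m0 (Nat.find hR) (Nat.find hQ) h1i hij hd1 hsij (pvFuel m0) 0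
      (by omega) (by unfold pvFuel; omega)
  have hB : allocate_b_alt m0 = ((Nat.find hQ : Nat) : Int) - ((Nat.find hR : Nat) : Int) := by
    unfold allocate_b_alt
    rw [pvFuelB_eq]
    exact pvLoopB_run m0 (Nat.find hR) (Nat.find hQ) h1i hij hd1 hsij himin (pvFuel m0) 0
      (by omega) (by unfold pvFuel; omega)
  rw [hA, hB]
  omega

-- ===== VERDICT (by name: the statement is the Claim_ definition above) =====
theorem allocate_b_spec : Claim_equal_allocate_b := by
  intro memory _ hpre
  unfold Spec_allocate_b
  exact pv_main memory hpre
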